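-- pv_equiv track=rewrite | github.com/z-ng/Artificial-Intelligence | Othello/Labs/OthelloC.py | findHorizontal
-- ===== SOURCE A (Python) =====
-- def findHorizontal(game, nextMove, index):
--     board = game
--     pos = index - 1
--     space = -1
--     while space < 0 and pos >= 0 and game[pos] != "." and pos // 8 == index // 8:
--         if game[pos] == nextMove:
--             space = pos
--         pos = pos - 1
--     if space != index - 1 and space != -1 and space // 8 == index // 8:
--         while pos != index:
--             pos = pos + 1
--             board = board[:pos] + nextMove + board[pos + 1:]
--     pos = index + 1
--     space = -1
--     while space < 0 and pos < 64 and game[pos] != "." and pos // 8 == index // 8:  # maybe add pos%8 != 0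
--         if game[pos] == nextMove:
--             space = pos
--         pos = pos + 1
--     if space != index + 1 and space != -1 and space // 8 == index // 8:
--         while pos != index and pos > 0:
--             pos = pos - 1
--             board = board[:pos] + nextMove + board[pos + 1:]
--     return board
-- ===== SOURCE B (Python) =====
-- def findHorizontal(game, nextMove, index):
--     # One directional anchor search instead of two copied loop-pairs,
--     # then a single slice rebuild instead of per-cell string surgery.
--     row = index // 8
--     lo, hi = max(row * 8, 0), row * 8 + 8
--
--     def anchor(step):
--         pos = index + step
--         while lo <= pos < hi and game[pos] != "." and game[pos] != nextMove:
--             pos += step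
--         if lo <= pos < hi and game[pos] != "." and game[pos] == nextMove and pos != index + step:
--             return pos
--         return None
--
--     left, right = anchor(-1), anchor(+1)
--     if left is None and right is None:
--         return game
--     L = left if left is not None else index
--     R = right if right is not None else index
--     return game[:L] + nextMove * (R - L + 1) + game[R + 1:]
-- ===== Notes on version B (the rewrite author's own statement) =====
-- stated objective: alternative
-- what changed: A's two copied scan-then-flip while-loop pairs (with per-cell string splicing) are replaced by one directional anchor-finding helper called with step=-1 and step=+1, after which the flipped row segment [L..R] is rebuilt in a single slice-and-repeat concatenation.
import Mathlib
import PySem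

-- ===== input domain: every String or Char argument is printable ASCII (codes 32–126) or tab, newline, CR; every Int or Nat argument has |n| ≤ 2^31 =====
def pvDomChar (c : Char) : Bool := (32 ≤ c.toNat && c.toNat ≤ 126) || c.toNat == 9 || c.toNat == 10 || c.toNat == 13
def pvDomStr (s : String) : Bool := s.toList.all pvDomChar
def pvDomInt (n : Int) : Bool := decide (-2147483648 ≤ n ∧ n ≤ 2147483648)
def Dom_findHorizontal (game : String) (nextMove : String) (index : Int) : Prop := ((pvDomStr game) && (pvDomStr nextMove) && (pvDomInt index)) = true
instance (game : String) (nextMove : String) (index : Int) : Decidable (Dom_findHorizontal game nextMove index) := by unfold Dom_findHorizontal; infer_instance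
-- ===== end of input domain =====

-- B replaces A's two copied scan/flip loop-pairs by one directional anchor helper and a single
-- slice rebuild of the row segment; same return value (alternative decomposition, not faster).


-- game[pos] as a character ('.' default only where Python would raise; Pre_ keeps every access in range)
def pvGetC (g : List Char) (pos : Int) : Char := PySem.List.pyGetD g pos '.'

-- board[:p] + nextMove + board[p+1:]
def pvSplice (b nm : List Char) (p : Int) : List Char :=
  PySem.List.slice b none (some p) ++ nm ++ PySem.List.slice b (some (p + 1)) none

-- ===== PORT A =====
-- first while loop: leftward scan recording `space`
def pvScanL (g nm : List Char) (index : Int) : Nat → Int → Int → Int × Int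
  | 0, pos, space => (pos, space)
  | f + 1, pos, space =>
    if space < 0 ∧ 0 ≤ pos ∧ pvGetC g pos ≠ '.' ∧
        PySem.Int.floordiv pos 8 = PySem.Int.floordiv index 8 then
      pvScanL g nm index f (pos - 1) (if nm = [pvGetC g pos] then pos else space)
    else (pos, space)

-- second while loop: `while pos != index: pos += 1; board = board[:pos] + nextMove + board[pos+1:]`
def pvFlipUp (nm : List Char) (index : Int) : Nat → Int → List Char → List Char
  | 0, _, b => b
  | f + 1, pos, b =>
    if pos ≠ index then pvFlipUp nm index f (pos + 1) (pvSplice b nm (pos + 1)) else b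

-- third while loop: rightward scan
def pvScanR (g nm : List Char) (index : Int) : Nat → Int → Int → Int × Int
  | 0, pos, space => (pos, space)
  | f + 1, pos, space =>
    if space < 0 ∧ pos < 64 ∧ pvGetC g pos ≠ '.' ∧
        PySem.Int.floordiv pos 8 = PySem.Int.floordiv index 8 then
      pvScanR g nm index f (pos + 1) (if nm = [pvGetC g pos] then pos else space)
    else (pos, space)

-- fourth while loop: `while pos != index and pos > 0: pos -= 1; board = …`
def pvFlipDown (nm : List Char) (index : Int) : Nat → Int → List Char → List Char
  | 0, _, b => b
  | f + 1, pos, b =>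
    if pos ≠ index ∧ 0 < pos then pvFlipDown nm index f (pos - 1) (pvSplice b nm (pos - 1)) else b

def findHorizontal (game : String) (nextMove : String) (index : Int) : String :=
  let g := game.toList
  let nm := nextMove.toList
  let r1 := pvScanL g nm index 200 (index - 1) (-1)
  let board1 :=
    if r1.2 ≠ index - 1 ∧ r1.2 ≠ -1 ∧ PySem.Int.floordiv r1.2 8 = PySem.Int.floordiv index 8 then
      pvFlipUp nm index 200 r1.1 g
    else g
  let r2 := pvScanR g nm index 200 (index + 1) (-1)
  let board2 :=
    if r2.2 ≠ index + 1 ∧ r2.2 ≠ -1 ∧ PySem.Int.floordiv r2.2 8 = PySem.Int.floordiv index 8 then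
      pvFlipDown nm index 200 r2.1 board1
    else board1
  String.ofList board2

-- ===== PORT B =====
-- `while lo <= pos < hi and game[pos] != "." and game[pos] != nextMove: pos += step`
def pvAnchorScan (g nm : List Char) (lo hi step : Int) : Nat → Int → Int
  | 0, pos => pos
  | f + 1, pos =>
    if lo ≤ pos ∧ pos < hi ∧ pvGetC g pos ≠ '.' ∧ nm ≠ [pvGetC g pos] then
      pvAnchorScan g nm lo hi step f (pos + step)
    else pos

def pvAnchor (g nm : List Char) (index lo hi step : Int) : Option Int :=
  let pos := pvAnchorScan g nm lo hi step 16 (index + step)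
  if lo ≤ pos ∧ pos < hi ∧ pvGetC g pos ≠ '.' ∧ nm = [pvGetC g pos] ∧ pos ≠ index + step then
    some pos
  else none

def findHorizontal_alt (game : String) (nextMove : String) (index : Int) : String :=
  let g := game.toList
  let nm := nextMove.toList
  let row := PySem.Int.floordiv index 8
  let lo := max (row * 8) 0
  let hi := row * 8 + 8
  let left := pvAnchor g nm index lo hi (-1)
  let right := pvAnchor g nm index lo hi 1
  if left = none ∧ right = none then game
  else
    let L := left.getD index
    let R := right.getD index
    String.ofList (PySem.List.slice g none (some L) ++
      PySem.List.pyRepeat nm (R - L + 1) ++ PySem.List.slice g (some (R + 1)) none)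

-- ===== PRECONDITION & SPEC =====
-- Pre_ excludes: inputs on which A raises IndexError (its rightward probe running off the end
-- of a short string because no '.'/nextMove stopper precedes it, or a negative index wrapping
-- past the start), and two rare returning corners: indexes ≥ 64 (off the 8×8 board, where A's
-- value depends on cells past the board) and an index equal to the string length at cell 63
-- (where A's flip silently appends past the end of the string).
def Pre_findHorizontal (game : String) (nextMove : String) (index : Int) : Prop :=
  (index < 0 ∧ 1 ≤ game.toList.length ∧ -(game.toList.length : Int) ≤ index + 1) ∨
  (0 ≤ index ∧ index < 64 ∧ index < (game.toList.length : Int) ∧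
    ¬(index ≤ 62 ∧ (game.toList.length : Int) ≤ min (PySem.Int.floordiv index 8 * 8 + 8) 63 ∧
        ((game.toList.drop (index + 1).toNat).all
          (fun c => !(c == '.') && !(nextMove == String.ofList [c]))) = true))
instance (game : String) (nextMove : String) (index : Int) : Decidable (Pre_findHorizontal game nextMove index) := by unfold Pre_findHorizontal; infer_instance

def pvWitness_findHorizontal : String × String × Int :=
  ("...........................ox.oxxxo.............................", "x", 26)

def Spec_findHorizontal (game : String) (nextMove : String) (index : Int) (out : String) : Prop := out = findHorizontal_alt game nextMove index
instance (game : String) (nextMove : String) (index : Int) (out : String) : Decidable (Spec_findHorizontal game nextMove index out) := by unfold Spec_findHorizontal; infer_instance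

-- ===== CLAIM (what is proved, stated in full; the proofs are below) =====
def Claim_equal_findHorizontal : Prop := ∀ (game : String) (nextMove : String) (index : Int), Dom_findHorizontal game nextMove index → Pre_findHorizontal game nextMove index → Spec_findHorizontal game nextMove index (findHorizontal game nextMove index)

-- ===== LEMMAS AND PROOFS =====

-- A's scan loops are inert when their loop condition fails, whatever the fuel
theorem pvScanL_halt (g nm : List Char) (index : Int) (f : Nat) (pos space : Int)
    (h : ¬(space < 0 ∧ 0 ≤ pos ∧ pvGetC g pos ≠ '.' ∧
      PySem.Int.floordiv pos 8 = PySem.Int.floordiv index 8)) :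
    pvScanL g nm index f pos space = (pos, space) := by
  cases f with
  | zero => rfl
  | succ f => simp only [pvScanL, if_neg h]

theorem pvFlipDown_halt (nm : List Char) (index : Int) (f : Nat) (pos : Int) (b : List Char)
    (h : ¬(pos ≠ index ∧ 0 < pos)) : pvFlipDown nm index f pos b = b := by
  cases f with
  | zero => rfl
  | succ f => simp only [pvFlipDown, if_neg h]

-- for a negative move index A's rightward scan never ends right of cell 0
theorem pvScanR_fst_nonpos (g nm : List Char) (index : Int)
    (hrow : PySem.Int.floordiv index 8 < 0) : ∀ (f : Nat) (pos space : Int), pos ≤ 0 →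
    (pvScanR g nm index f pos space).1 ≤ 0 := by
  intro f
  induction f with
  | zero => intro pos space h; exact h
  | succ f ih =>
    intro pos space h
    simp only [pvScanR]
    split
    · rename_i hc
      apply ih
      by_cases hp0 : pos = 0
      · exfalso
        rw [hp0] at hc
        have h8 := hc.2.2.2
        rw [show PySem.Int.floordiv 0 8 = 0 from rfl] at h8
        omega
      · omega
    · exact h

-- a cell read as non-'.' really lies inside the string
theorem pv_getC_lt (g : List Char) (p : Int) (h : pvGetC g p ≠ '.') :
    p < (g.length : Int) := by
  by_contra hc
  apply h
  apply PySem.List.pyGetD_of_none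
  simp [PySem.List.pyGet?_eq_none_iff, PySem.Raise.InRange]
  omega

-- A's scan loops freeze once `space` is set
theorem pvScanL_stop (g nm : List Char) (index : Int) (f : Nat) (pos space : Int)
    (h : 0 ≤ space) : pvScanL g nm index f pos space = (pos, space) := by
  cases f with
  | zero => rfl
  | succ f => simp [pvScanL]; omega

theorem pvScanR_stop (g nm : List Char) (index : Int) (f : Nat) (pos space : Int)
    (h : 0 ≤ space) : pvScanR g nm index f pos space = (pos, space) := by
  cases f with
  | zero => rfl
  | succ f => simp [pvScanR]; omega

-- B's scan is inert when its loop condition fails, whatever the fuel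
theorem pvAnchorScan_stop (g nm : List Char) (lo hi step : Int) (f : Nat) (pos : Int)
    (h : ¬(lo ≤ pos ∧ pos < hi ∧ pvGetC g pos ≠ '.' ∧ nm ≠ [pvGetC g pos])) :
    pvAnchorScan g nm lo hi step f pos = pos := by
  cases f with
  | zero => rfl
  | succ f => simp only [pvAnchorScan, if_neg h]

-- the in-row tests of A (pos ≥ 0 / pos < 64 plus pos//8 == index//8) are the window [lo, hi)
theorem pv_row_window (index : Int) (h0 : 0 ≤ index) (h64 : index < 64) :
    (PySem.Int.floordiv index 8 * 8 ≤ index ∧ index < PySem.Int.floordiv index 8 * 8 + 8) ∧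
      0 ≤ PySem.Int.floordiv index 8 * 8 ∧ PySem.Int.floordiv index 8 * 8 + 8 ≤ 64 ∧
      (∀ p : Int, PySem.Int.floordiv p 8 = PySem.Int.floordiv index 8 ↔
        PySem.Int.floordiv index 8 * 8 ≤ p ∧ p < PySem.Int.floordiv index 8 * 8 + 8) := by
  have hi : PySem.Int.floordiv index 8 * 8 ≤ index ∧ index < (PySem.Int.floordiv index 8 + 1) * 8 :=
    (PySem.Int.floordiv_eq_iff_of_pos (by omega)).mp rfl
  refine ⟨by omega, by omega, by omega, fun p => ?_⟩
  rw [PySem.Int.floordiv_eq_iff_of_pos (by omega)]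
  omega

-- LEFT: A's scan against B's leftward anchor scan
theorem pv_left_rel (g nm : List Char) (index lo hi : Int) (hl : 0 ≤ lo)
    (hcond : ∀ p : Int, PySem.Int.floordiv p 8 = PySem.Int.floordiv index 8 ↔ lo ≤ p ∧ p < hi) :
    ∀ (f1 f2 : Nat) (pos : Int), pos < lo + f1 → pos < lo + f2 →
      pvScanL g nm index f1 pos (-1) =
        (if lo ≤ pvAnchorScan g nm lo hi (-1) f2 pos ∧ pvAnchorScan g nm lo hi (-1) f2 pos < hi ∧
            pvGetC g (pvAnchorScan g nm lo hi (-1) f2 pos) ≠ '.' ∧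
            nm = [pvGetC g (pvAnchorScan g nm lo hi (-1) f2 pos)] then
          (pvAnchorScan g nm lo hi (-1) f2 pos - 1, pvAnchorScan g nm lo hi (-1) f2 pos)
        else (pvAnchorScan g nm lo hi (-1) f2 pos, -1)) := by
  intro f1
  induction f1 with
  | zero =>
    intro f2 pos h1 h2
    have hs : pvAnchorScan g nm lo hi (-1) f2 pos = pos :=
      pvAnchorScan_stop g nm lo hi (-1) f2 pos (by intro h; omega)
    rw [hs, if_neg (by intro h; omega)]
    rfl
  | succ f ih =>
    intro f2 pos h1 h2
    by_cases hin : lo ≤ pos ∧ pos < hi ∧ pvGetC g pos ≠ '.'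
    · by_cases hm : nm = [pvGetC g pos]
      · have hs : pvAnchorScan g nm lo hi (-1) f2 pos = pos :=
          pvAnchorScan_stop g nm lo hi (-1) f2 pos (by intro h; exact h.2.2.2 hm)
        rw [hs, if_pos ⟨hin.1, hin.2.1, hin.2.2, hm⟩]
        simp only [pvScanL]
        rw [if_pos ⟨by omega, by omega, hin.2.2, (hcond pos).mpr ⟨hin.1, hin.2.1⟩⟩,
          if_pos hm]
        exact pvScanL_stop g nm index f (pos - 1) pos (by omega)
      · cases f2 with
        | zero => omega
        | succ f2 =>
          have hstep : pvAnchorScan g nm lo hi (-1) (f2 + 1) pos =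
              pvAnchorScan g nm lo hi (-1) f2 (pos - 1) := by
            simp only [pvAnchorScan]
            rw [if_pos ⟨hin.1, hin.2.1, hin.2.2, hm⟩]
            norm_num [sub_eq_add_neg]
          rw [hstep]
          simp only [pvScanL]
          rw [if_pos ⟨by omega, by omega, hin.2.2, (hcond pos).mpr ⟨hin.1, hin.2.1⟩⟩, if_neg hm]
          exact ih f2 (pos - 1) (by omega) (by omega)
    · have hs : pvAnchorScan g nm lo hi (-1) f2 pos = pos :=
        pvAnchorScan_stop g nm lo hi (-1) f2 pos (by intro h; exact hin ⟨h.1, h.2.1, h.2.2.1⟩)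
      rw [hs, if_neg (by intro h; exact hin ⟨h.1, h.2.1, h.2.2.1⟩)]
      simp only [pvScanL]
      rw [if_neg (by intro h; exact hin ⟨((hcond pos).mp h.2.2.2).1, ((hcond pos).mp h.2.2.2).2, h.2.2.1⟩)]

-- RIGHT: A's scan against B's rightward anchor scan
theorem pv_right_rel (g nm : List Char) (index lo hi : Int) (hl : 0 ≤ lo) (hhi : hi ≤ 64)
    (hcond : ∀ p : Int, PySem.Int.floordiv p 8 = PySem.Int.floordiv index 8 ↔ lo ≤ p ∧ p < hi) :
    ∀ (f1 f2 : Nat) (pos : Int), hi - f1 < pos → hi - f2 < pos →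
      pvScanR g nm index f1 pos (-1) =
        (if lo ≤ pvAnchorScan g nm lo hi 1 f2 pos ∧ pvAnchorScan g nm lo hi 1 f2 pos < hi ∧
            pvGetC g (pvAnchorScan g nm lo hi 1 f2 pos) ≠ '.' ∧
            nm = [pvGetC g (pvAnchorScan g nm lo hi 1 f2 pos)] then
          (pvAnchorScan g nm lo hi 1 f2 pos + 1, pvAnchorScan g nm lo hi 1 f2 pos)
        else (pvAnchorScan g nm lo hi 1 f2 pos, -1)) := by
  intro f1
  induction f1 with
  | zero =>
    intro f2 pos h1 h2
    have hs : pvAnchorScan g nm lo hi 1 f2 pos = pos :=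
      pvAnchorScan_stop g nm lo hi 1 f2 pos (by intro h; omega)
    rw [hs, if_neg (by intro h; omega)]
    rfl
  | succ f ih =>
    intro f2 pos h1 h2
    by_cases hin : lo ≤ pos ∧ pos < hi ∧ pvGetC g pos ≠ '.'
    · by_cases hm : nm = [pvGetC g pos]
      · have hs : pvAnchorScan g nm lo hi 1 f2 pos = pos :=
          pvAnchorScan_stop g nm lo hi 1 f2 pos (by intro h; exact h.2.2.2 hm)
        rw [hs, if_pos ⟨hin.1, hin.2.1, hin.2.2, hm⟩]
        simp only [pvScanR]
        rw [if_pos ⟨by omega, by omega, hin.2.2, (hcond pos).mpr ⟨hin.1, hin.2.1⟩⟩,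
          if_pos hm]
        exact pvScanR_stop g nm index f (pos + 1) pos (by omega)
      · cases f2 with
        | zero => omega
        | succ f2 =>
          have hstep : pvAnchorScan g nm lo hi 1 (f2 + 1) pos =
              pvAnchorScan g nm lo hi 1 f2 (pos + 1) := by
            simp only [pvAnchorScan]
            rw [if_pos ⟨hin.1, hin.2.1, hin.2.2, hm⟩]
          rw [hstep]
          simp only [pvScanR]
          rw [if_pos ⟨by omega, by omega, hin.2.2, (hcond pos).mpr ⟨hin.1, hin.2.1⟩⟩, if_neg hm]
          exact ih f2 (pos + 1) (by omega) (by omega)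
    · have hs : pvAnchorScan g nm lo hi 1 f2 pos = pos :=
        pvAnchorScan_stop g nm lo hi 1 f2 pos (by intro h; exact hin ⟨h.1, h.2.1, h.2.2.1⟩)
      rw [hs, if_neg (by intro h; exact hin ⟨h.1, h.2.1, h.2.2.1⟩)]
      simp only [pvScanR]
      rw [if_neg (by intro h; exact hin ⟨((hcond pos).mp h.2.2.2).1, ((hcond pos).mp h.2.2.2).2, h.2.2.1⟩)]

-- a single-character splice is List.set
theorem pvSplice_eq_set (b : List Char) (ch : Char) (p : Int) (h0 : 0 ≤ p) (hp : p < b.length) :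
    pvSplice b [ch] p = b.set p.toNat ch := by
  rw [pvSplice, PySem.List.slice_to b h0, PySem.List.slice_from b (by omega),
    List.set_eq_take_cons_drop ch (show p.toNat < b.length by omega),
    show (p + 1).toNat = p.toNat + 1 by omega]
  simp

-- setting one cell then truncating just past it
theorem pv_take_set_succ (b : List Char) (k : Nat) (ch : Char) (h : k < b.length) :
    (b.set k ch).take (k + 1) = b.take k ++ [ch] := by
  rw [List.set_eq_take_cons_drop ch h, List.take_append]
  simp [Nat.le_of_lt h]

-- dropping exactly at the cell just set
theorem pv_drop_set_self (b : List Char) (k : Nat) (ch : Char) (h : k < b.length) :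
    (b.set k ch).drop k = ch :: b.drop (k + 1) := by
  rw [List.set_eq_take_cons_drop ch h,
    List.drop_append_of_le_length (by simp [Nat.le_of_lt h])]
  simp

-- A's upward flip loop in closed form
theorem pvFlipUp_eq (ch : Char) (index : Int) :
    ∀ (f : Nat) (pos : Int) (b : List Char), pos ≤ index → (index - pos).toNat ≤ f →
      -1 ≤ pos → index < b.length →
      pvFlipUp [ch] index f pos b =
        b.take (pos + 1).toNat ++ List.replicate (index - pos).toNat ch ++ b.drop (index + 1).toNat := by
  intro f
  induction f with
  | zero =>
    intro pos b h1 h2 h3 h4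
    have hpi : pos = index := by omega
    subst hpi
    have hb : pvFlipUp [ch] pos 0 pos b = b := rfl
    rw [hb, show (pos - pos).toNat = 0 by omega, List.replicate_zero]
    simp
  | succ f ih =>
    intro pos b h1 h2 h3 h4
    by_cases hp : pos = index
    · subst hp
      have hb : pvFlipUp [ch] pos (f + 1) pos b = b := by
        simp only [pvFlipUp]
        rw [if_neg (by simp)]
      rw [hb, show (pos - pos).toNat = 0 by omega, List.replicate_zero]
      simp
    · simp only [pvFlipUp]
      rw [if_pos hp, pvSplice_eq_set b ch (pos + 1) (by omega) (by omega),
        ih (pos + 1) _ (by omega) (by omega) (by omega) (by simpa using h4),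
        List.drop_set_of_lt (show (pos + 1).toNat < (index + 1).toNat by omega),
        show (pos + 1 + 1).toNat = (pos + 1).toNat + 1 by omega,
        pv_take_set_succ b (pos + 1).toNat ch (by omega),
        show (index - pos).toNat = (index - (pos + 1)).toNat + 1 by omega,
        List.replicate_succ]
      simp

-- A's downward flip loop in closed form
theorem pvFlipDown_eq (ch : Char) (index : Int) (h0 : 0 ≤ index) :
    ∀ (f : Nat) (pos : Int) (b : List Char), index ≤ pos → (pos - index).toNat ≤ f →
      pos ≤ b.length →
      pvFlipDown [ch] index f pos b =
        b.take index.toNat ++ List.replicate (pos - index).toNat ch ++ b.drop pos.toNat := by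
  intro f
  induction f with
  | zero =>
    intro pos b h1 h2 h3
    have hpi : pos = index := by omega
    subst hpi
    have hb : pvFlipDown [ch] pos 0 pos b = b := rfl
    rw [hb, show (pos - pos).toNat = 0 by omega, List.replicate_zero]
    simp
  | succ f ih =>
    intro pos b h1 h2 h3
    by_cases hp : pos = index
    · subst hp
      have hb : pvFlipDown [ch] pos (f + 1) pos b = b := by
        simp only [pvFlipDown]
        rw [if_neg (by simp)]
      rw [hb, show (pos - pos).toNat = 0 by omega, List.replicate_zero]
      simp
    · simp only [pvFlipDown]
      rw [if_pos ⟨hp, by omega⟩, pvSplice_eq_set b ch (pos - 1) (by omega) (by omega),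
        ih (pos - 1) _ (by omega) (by omega) (by simp; omega),
        List.take_set_of_le (show index.toNat ≤ (pos - 1).toNat by omega),
        pv_drop_set_self b (pos - 1).toNat ch (by omega),
        show (pos - 1).toNat + 1 = pos.toNat by omega,
        show (pos - index).toNat = (pos - 1 - index).toNat + 1 by omega,
        List.replicate_succ']
      simp

-- B's leftward scan never moves right, rightward never left
theorem pvAnchorScan_le (g nm : List Char) (lo hi : Int) : ∀ (f : Nat) (pos : Int),
    pvAnchorScan g nm lo hi (-1) f pos ≤ pos := by
  intro f
  induction f with
  | zero => intro pos; exact le_refl _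
  | succ f ih =>
    intro pos
    simp only [pvAnchorScan]
    split
    · have := ih (pos + -1)
      omega
    · exact le_refl _

theorem pvAnchorScan_ge (g nm : List Char) (lo hi : Int) : ∀ (f : Nat) (pos : Int),
    pos ≤ pvAnchorScan g nm lo hi 1 f pos := by
  intro f
  induction f with
  | zero => intro pos; exact le_refl _
  | succ f ih =>
    intro pos
    simp only [pvAnchorScan]
    split
    · have := ih (pos + 1)
      omega
    · exact le_refl _

-- composing the two flips: flipping [L, idx] and then [idx, R] is flipping [L, R]
theorem pv_double (g : List Char) (ch : Char) (L idx R : Nat)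
    (h1 : L ≤ idx) (h2 : idx ≤ R) (h3 : R < g.length) :
    (g.take L ++ List.replicate (idx - L + 1) ch ++ g.drop (idx + 1)).take idx ++
        List.replicate (R + 1 - idx) ch ++
        (g.take L ++ List.replicate (idx - L + 1) ch ++ g.drop (idx + 1)).drop (R + 1) =
      g.take L ++ List.replicate (R - L + 1) ch ++ g.drop (R + 1) := by
  apply List.ext_getElem
  · simp
    omega
  · intro i hi1 hi2
    simp only [List.getElem_append, List.getElem_take, List.getElem_drop,
      List.getElem_replicate, List.length_append, List.length_take, List.length_replicate,
      List.length_drop]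
    split_ifs <;> first | rfl | (congr 1; omega)

-- ===== VERDICT (by name: the statement is the Claim_ definition above) =====
theorem findHorizontal_spec : Claim_equal_findHorizontal := by
  intro game nextMove index _hdom hpre
  unfold Spec_findHorizontal
  rcases hpre with ⟨hneg, hn1, hwrap⟩ | ⟨h0, h64, hidxn, _hsafe⟩
  · -- off-board negative index: A never flips (its `pos > 0` guard), B's clamped window is empty
    have hq : PySem.Int.floordiv index 8 * 8 ≤ index ∧
        index < (PySem.Int.floordiv index 8 + 1) * 8 :=
      (PySem.Int.floordiv_eq_iff_of_pos (by omega)).mp rfl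
    have hrow : PySem.Int.floordiv index 8 < 0 := by omega
    simp only [findHorizontal, findHorizontal_alt, pvAnchor]
    rw [show index + (-1) = index - 1 from by ring]
    rw [pvScanL_halt game.toList nextMove.toList index 200 (index - 1) (-1)
      (fun h => absurd h.2.1 (by omega))]
    simp only []
    rw [if_neg (show ¬((-1 : Int) ≠ index - 1 ∧ (-1 : Int) ≠ -1 ∧
      PySem.Int.floordiv (-1) 8 = PySem.Int.floordiv index 8) from fun h => h.2.1 rfl)]
    rw [pvAnchorScan_stop game.toList nextMove.toList
      (max (PySem.Int.floordiv index 8 * 8) 0) (PySem.Int.floordiv index 8 * 8 + 8)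
      (-1) 16 (index - 1) (fun h => absurd h.1 (by omega))]
    rw [pvAnchorScan_stop game.toList nextMove.toList
      (max (PySem.Int.floordiv index 8 * 8) 0) (PySem.Int.floordiv index 8 * 8 + 8)
      1 16 (index + 1) (by intro h; have h1 := h.1; have h2 := h.2.1; omega)]
    rw [if_neg (show ¬(max (PySem.Int.floordiv index 8 * 8) 0 ≤ index - 1 ∧
        index - 1 < PySem.Int.floordiv index 8 * 8 + 8 ∧
        pvGetC game.toList (index - 1) ≠ '.' ∧
        nextMove.toList = [pvGetC game.toList (index - 1)] ∧ index - 1 ≠ index - 1) from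
      fun h => h.2.2.2.2 rfl)]
    rw [if_neg (show ¬(max (PySem.Int.floordiv index 8 * 8) 0 ≤ index + 1 ∧
        index + 1 < PySem.Int.floordiv index 8 * 8 + 8 ∧
        pvGetC game.toList (index + 1) ≠ '.' ∧
        nextMove.toList = [pvGetC game.toList (index + 1)] ∧ index + 1 ≠ index + 1) from
      fun h => h.2.2.2.2 rfl)]
    rw [if_pos (show (none : Option Int) = none ∧ (none : Option Int) = none from ⟨rfl, rfl⟩)]
    have hr2 : (pvScanR game.toList nextMove.toList index 200 (index + 1) (-1)).1 ≤ 0 :=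
      pvScanR_fst_nonpos game.toList nextMove.toList index hrow 200 (index + 1) (-1)
        (by omega)
    split_ifs with hgd
    · rw [pvFlipDown_halt nextMove.toList index 200 _ game.toList
        (fun h => absurd h.2 (by omega)), String.ofList_toList]
    · exact String.ofList_toList
  · obtain ⟨⟨hli, hih⟩, hl, hhi, hcond⟩ := pv_row_window index h0 h64
    simp only [findHorizontal, findHorizontal_alt, pvAnchor]
    rw [max_eq_left hl]
    rw [show index + (-1) = index - 1 from by ring]
    rw [pv_left_rel game.toList nextMove.toList index _ _ hl hcond 200 16 (index - 1)
      (by omega) (by omega)]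
    rw [pv_right_rel game.toList nextMove.toList index _ _ hl hhi hcond 200 16 (index + 1)
      (by omega) (by omega)]
    set g := game.toList with hg
    set nm := nextMove.toList with hnm
    set lo := PySem.Int.floordiv index 8 * 8 with hlo
    set aL := pvAnchorScan g nm lo (lo + 8) (-1) 16 (index - 1) with haL
    set aR := pvAnchorScan g nm lo (lo + 8) 1 16 (index + 1) with haR
    have haLle : aL ≤ index - 1 := pvAnchorScan_le g nm lo (lo + 8) 16 (index - 1)
    have haRge : index + 1 ≤ aR := pvAnchorScan_ge g nm lo (lo + 8) 16 (index + 1)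
    by_cases hCL : lo ≤ aL ∧ aL < lo + 8 ∧ pvGetC g aL ≠ '.' ∧ nm = [pvGetC g aL]
    · rw [if_pos hCL]
      simp only []
      by_cases hLadj : aL = index - 1
      · by_cases hCR : lo ≤ aR ∧ aR < lo + 8 ∧ pvGetC g aR ≠ '.' ∧ nm = [pvGetC g aR]
        · rw [if_pos hCR]
          simp only []
          by_cases hRadj : aR = index + 1
          · rw [if_neg (show ¬(aL ≠ index - 1 ∧ aL ≠ -1 ∧ PySem.Int.floordiv aL 8 = PySem.Int.floordiv index 8) from fun h => h.1 hLadj)]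
            rw [if_neg (show ¬(lo ≤ aL ∧ aL < lo + 8 ∧ pvGetC g aL ≠ '.' ∧ nm = [pvGetC g aL] ∧ aL ≠ index - 1) from fun h => h.2.2.2.2 hLadj)]
            rw [if_neg (show ¬(aR ≠ index + 1 ∧ aR ≠ -1 ∧ PySem.Int.floordiv aR 8 = PySem.Int.floordiv index 8) from fun h => h.1 hRadj)]
            rw [if_neg (show ¬(lo ≤ aR ∧ aR < lo + 8 ∧ pvGetC g aR ≠ '.' ∧ nm = [pvGetC g aR] ∧ aR ≠ index + 1) from fun h => h.2.2.2.2 hRadj)]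
            rw [if_pos ⟨rfl, rfl⟩, hg, String.ofList_toList]
          · have hfdR : PySem.Int.floordiv aR 8 = PySem.Int.floordiv index 8 := (hcond aR).mpr ⟨hCR.1, hCR.2.1⟩
            have haRlt : aR < (g.length : Int) := pv_getC_lt g aR hCR.2.2.1
            rw [if_neg (show ¬(aL ≠ index - 1 ∧ aL ≠ -1 ∧ PySem.Int.floordiv aL 8 = PySem.Int.floordiv index 8) from fun h => h.1 hLadj)]
            rw [if_neg (show ¬(lo ≤ aL ∧ aL < lo + 8 ∧ pvGetC g aL ≠ '.' ∧ nm = [pvGetC g aL] ∧ aL ≠ index - 1) from fun h => h.2.2.2.2 hLadj)]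
            rw [if_pos (show aR ≠ index + 1 ∧ aR ≠ -1 ∧ PySem.Int.floordiv aR 8 = PySem.Int.floordiv index 8 from ⟨hRadj, by omega, hfdR⟩)]
            rw [if_pos (show lo ≤ aR ∧ aR < lo + 8 ∧ pvGetC g aR ≠ '.' ∧ nm = [pvGetC g aR] ∧ aR ≠ index + 1 from ⟨hCR.1, hCR.2.1, hCR.2.2.1, hCR.2.2.2, hRadj⟩)]
            rw [if_neg (by simp)]
            simp only [Option.getD_some, Option.getD_none]
            rw [PySem.List.slice_to g (by omega), PySem.List.slice_from g (by omega)]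
            rw [hCR.2.2.2, PySem.List.pyRepeat_singleton]
            rw [pvFlipDown_eq (pvGetC g aR) index h0 200 (aR + 1) g (by omega) (by omega) (by omega)]
            rw [show (aR + 1 - index).toNat = (aR - index + 1).toNat by omega]
        · rw [if_neg hCR]
          simp only []
          rw [if_neg (show ¬(aL ≠ index - 1 ∧ aL ≠ -1 ∧ PySem.Int.floordiv aL 8 = PySem.Int.floordiv index 8) from fun h => h.1 hLadj)]
          rw [if_neg (show ¬(lo ≤ aL ∧ aL < lo + 8 ∧ pvGetC g aL ≠ '.' ∧ nm = [pvGetC g aL] ∧ aL ≠ index - 1) from fun h => h.2.2.2.2 hLadj)]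
          rw [if_neg (show ¬((-1 : Int) ≠ index + 1 ∧ (-1 : Int) ≠ -1 ∧ PySem.Int.floordiv (-1) 8 = PySem.Int.floordiv index 8) from fun h => h.2.1 rfl)]
          rw [if_neg (show ¬(lo ≤ aR ∧ aR < lo + 8 ∧ pvGetC g aR ≠ '.' ∧ nm = [pvGetC g aR] ∧ aR ≠ index + 1) from fun h => hCR ⟨h.1, h.2.1, h.2.2.1, h.2.2.2.1⟩)]
          rw [if_pos ⟨rfl, rfl⟩, hg, String.ofList_toList]
      · have hfdL : PySem.Int.floordiv aL 8 = PySem.Int.floordiv index 8 :=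
          (hcond aL).mpr ⟨hCL.1, hCL.2.1⟩
        have haLlt : aL < (g.length : Int) := pv_getC_lt g aL hCL.2.2.1
        by_cases hCR : lo ≤ aR ∧ aR < lo + 8 ∧ pvGetC g aR ≠ '.' ∧ nm = [pvGetC g aR]
        · rw [if_pos hCR]
          simp only []
          by_cases hRadj : aR = index + 1
          · rw [if_pos (show aL ≠ index - 1 ∧ aL ≠ -1 ∧ PySem.Int.floordiv aL 8 = PySem.Int.floordiv index 8 from ⟨hLadj, by omega, hfdL⟩)]
            rw [if_pos (show lo ≤ aL ∧ aL < lo + 8 ∧ pvGetC g aL ≠ '.' ∧ nm = [pvGetC g aL] ∧ aL ≠ index - 1 from ⟨hCL.1, hCL.2.1, hCL.2.2.1, hCL.2.2.2, hLadj⟩)]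
            rw [if_neg (show ¬(aR ≠ index + 1 ∧ aR ≠ -1 ∧ PySem.Int.floordiv aR 8 = PySem.Int.floordiv index 8) from fun h => h.1 hRadj)]
            rw [if_neg (show ¬(lo ≤ aR ∧ aR < lo + 8 ∧ pvGetC g aR ≠ '.' ∧ nm = [pvGetC g aR] ∧ aR ≠ index + 1) from fun h => h.2.2.2.2 hRadj)]
            rw [if_neg (by simp)]
            simp only [Option.getD_some, Option.getD_none]
            rw [PySem.List.slice_to g (by omega), PySem.List.slice_from g (by omega)]
            rw [hCL.2.2.2, PySem.List.pyRepeat_singleton]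
            rw [pvFlipUp_eq (pvGetC g aL) index 200 (aL - 1) g (by omega) (by omega) (by omega) (by omega)]
            rw [show (aL - 1 + 1).toNat = aL.toNat by omega, show (index - (aL - 1)).toNat = (index - aL + 1).toNat by omega]
          · have hfdR : PySem.Int.floordiv aR 8 = PySem.Int.floordiv index 8 := (hcond aR).mpr ⟨hCR.1, hCR.2.1⟩
            have haRlt : aR < (g.length : Int) := pv_getC_lt g aR hCR.2.2.1
            rw [if_pos (show aL ≠ index - 1 ∧ aL ≠ -1 ∧ PySem.Int.floordiv aL 8 = PySem.Int.floordiv index 8 from ⟨hLadj, by omega, hfdL⟩)]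
            rw [if_pos (show lo ≤ aL ∧ aL < lo + 8 ∧ pvGetC g aL ≠ '.' ∧ nm = [pvGetC g aL] ∧ aL ≠ index - 1 from ⟨hCL.1, hCL.2.1, hCL.2.2.1, hCL.2.2.2, hLadj⟩)]
            rw [if_pos (show aR ≠ index + 1 ∧ aR ≠ -1 ∧ PySem.Int.floordiv aR 8 = PySem.Int.floordiv index 8 from ⟨hRadj, by omega, hfdR⟩)]
            rw [if_pos (show lo ≤ aR ∧ aR < lo + 8 ∧ pvGetC g aR ≠ '.' ∧ nm = [pvGetC g aR] ∧ aR ≠ index + 1 from ⟨hCR.1, hCR.2.1, hCR.2.2.1, hCR.2.2.2, hRadj⟩)]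
            rw [if_neg (by simp)]
            simp only [Option.getD_some]
            rw [PySem.List.slice_to g (by omega), PySem.List.slice_from g (by omega)]
            rw [hCL.2.2.2, PySem.List.pyRepeat_singleton]
            rw [pvFlipUp_eq (pvGetC g aL) index 200 (aL - 1) g (by omega) (by omega) (by omega) (by omega)]
            rw [pvFlipDown_eq (pvGetC g aL) index h0 200 (aR + 1) _ (by omega) (by omega) (by simp; omega)]
            rw [show (aL - 1 + 1).toNat = aL.toNat by omega, show (index - (aL - 1)).toNat = index.toNat - aL.toNat + 1 by omega, show (index + 1).toNat = index.toNat + 1 by omega, show (aR + 1 - index).toNat = aR.toNat + 1 - index.toNat by omega, show (aR + 1).toNat = aR.toNat + 1 by omega, show (aR - aL + 1).toNat = aR.toNat - aL.toNat + 1 by omega]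
            exact congrArg String.ofList (pv_double g (pvGetC g aL) aL.toNat index.toNat aR.toNat (by omega) (by omega) (by omega))
        · rw [if_neg hCR]
          simp only []
          rw [if_pos (show aL ≠ index - 1 ∧ aL ≠ -1 ∧ PySem.Int.floordiv aL 8 = PySem.Int.floordiv index 8 from ⟨hLadj, by omega, hfdL⟩)]
          rw [if_pos (show lo ≤ aL ∧ aL < lo + 8 ∧ pvGetC g aL ≠ '.' ∧ nm = [pvGetC g aL] ∧ aL ≠ index - 1 from ⟨hCL.1, hCL.2.1, hCL.2.2.1, hCL.2.2.2, hLadj⟩)]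
          rw [if_neg (show ¬((-1 : Int) ≠ index + 1 ∧ (-1 : Int) ≠ -1 ∧ PySem.Int.floordiv (-1) 8 = PySem.Int.floordiv index 8) from fun h => h.2.1 rfl)]
          rw [if_neg (show ¬(lo ≤ aR ∧ aR < lo + 8 ∧ pvGetC g aR ≠ '.' ∧ nm = [pvGetC g aR] ∧ aR ≠ index + 1) from fun h => hCR ⟨h.1, h.2.1, h.2.2.1, h.2.2.2.1⟩)]
          rw [if_neg (by simp)]
          simp only [Option.getD_some, Option.getD_none]
          rw [PySem.List.slice_to g (by omega), PySem.List.slice_from g (by omega)]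
          rw [hCL.2.2.2, PySem.List.pyRepeat_singleton]
          rw [pvFlipUp_eq (pvGetC g aL) index 200 (aL - 1) g (by omega) (by omega) (by omega) (by omega)]
          rw [show (aL - 1 + 1).toNat = aL.toNat by omega, show (index - (aL - 1)).toNat = (index - aL + 1).toNat by omega]
    · rw [if_neg hCL]
      simp only []
      by_cases hCR : lo ≤ aR ∧ aR < lo + 8 ∧ pvGetC g aR ≠ '.' ∧ nm = [pvGetC g aR]
      · rw [if_pos hCR]
        simp only []
        by_cases hRadj : aR = index + 1
        · rw [if_neg (show ¬((-1 : Int) ≠ index - 1 ∧ (-1 : Int) ≠ -1 ∧ PySem.Int.floordiv (-1) 8 = PySem.Int.floordiv index 8) from fun h => h.2.1 rfl)]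
          rw [if_neg (show ¬(lo ≤ aL ∧ aL < lo + 8 ∧ pvGetC g aL ≠ '.' ∧ nm = [pvGetC g aL] ∧ aL ≠ index - 1) from fun h => hCL ⟨h.1, h.2.1, h.2.2.1, h.2.2.2.1⟩)]
          rw [if_neg (show ¬(aR ≠ index + 1 ∧ aR ≠ -1 ∧ PySem.Int.floordiv aR 8 = PySem.Int.floordiv index 8) from fun h => h.1 hRadj)]
          rw [if_neg (show ¬(lo ≤ aR ∧ aR < lo + 8 ∧ pvGetC g aR ≠ '.' ∧ nm = [pvGetC g aR] ∧ aR ≠ index + 1) from fun h => h.2.2.2.2 hRadj)]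
          rw [if_pos ⟨rfl, rfl⟩, hg, String.ofList_toList]
        · have hfdR : PySem.Int.floordiv aR 8 = PySem.Int.floordiv index 8 := (hcond aR).mpr ⟨hCR.1, hCR.2.1⟩
          have haRlt : aR < (g.length : Int) := pv_getC_lt g aR hCR.2.2.1
          rw [if_neg (show ¬((-1 : Int) ≠ index - 1 ∧ (-1 : Int) ≠ -1 ∧ PySem.Int.floordiv (-1) 8 = PySem.Int.floordiv index 8) from fun h => h.2.1 rfl)]
          rw [if_neg (show ¬(lo ≤ aL ∧ aL < lo + 8 ∧ pvGetC g aL ≠ '.' ∧ nm = [pvGetC g aL] ∧ aL ≠ index - 1) from fun h => hCL ⟨h.1, h.2.1, h.2.2.1, h.2.2.2.1⟩)]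
          rw [if_pos (show aR ≠ index + 1 ∧ aR ≠ -1 ∧ PySem.Int.floordiv aR 8 = PySem.Int.floordiv index 8 from ⟨hRadj, by omega, hfdR⟩)]
          rw [if_pos (show lo ≤ aR ∧ aR < lo + 8 ∧ pvGetC g aR ≠ '.' ∧ nm = [pvGetC g aR] ∧ aR ≠ index + 1 from ⟨hCR.1, hCR.2.1, hCR.2.2.1, hCR.2.2.2, hRadj⟩)]
          rw [if_neg (by simp)]
          simp only [Option.getD_some, Option.getD_none]
          rw [PySem.List.slice_to g (by omega), PySem.List.slice_from g (by omega)]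
          rw [hCR.2.2.2, PySem.List.pyRepeat_singleton]
          rw [pvFlipDown_eq (pvGetC g aR) index h0 200 (aR + 1) g (by omega) (by omega) (by omega)]
          rw [show (aR + 1 - index).toNat = (aR - index + 1).toNat by omega]
      · rw [if_neg hCR]
        simp only []
        rw [if_neg (show ¬((-1 : Int) ≠ index - 1 ∧ (-1 : Int) ≠ -1 ∧ PySem.Int.floordiv (-1) 8 = PySem.Int.floordiv index 8) from fun h => h.2.1 rfl)]
        rw [if_neg (show ¬(lo ≤ aL ∧ aL < lo + 8 ∧ pvGetC g aL ≠ '.' ∧ nm = [pvGetC g aL] ∧ aL ≠ index - 1) from fun h => hCL ⟨h.1, h.2.1, h.2.2.1, h.2.2.2.1⟩)]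
        rw [if_neg (show ¬((-1 : Int) ≠ index + 1 ∧ (-1 : Int) ≠ -1 ∧ PySem.Int.floordiv (-1) 8 = PySem.Int.floordiv index 8) from fun h => h.2.1 rfl)]
        rw [if_neg (show ¬(lo ≤ aR ∧ aR < lo + 8 ∧ pvGetC g aR ≠ '.' ∧ nm = [pvGetC g aR] ∧ aR ≠ index + 1) from fun h => hCR ⟨h.1, h.2.1, h.2.2.1, h.2.2.2.1⟩)]
        rw [if_pos ⟨rfl, rfl⟩, hg, String.ofList_toList]
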